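-- pv_equiv track=rewrite | github.com/utkdigitalinitiatives/etds_utk_edu_migration | run.py | prep_mms_ids_for_searching
-- ===== SOURCE A (Python) =====
-- def prep_mms_ids_for_searching(etds):
--     mms_ids = [
--         etd["mms"]
--         for etd in etds
--         if etd["mms"] != "Cannot find in Primo based on title."
--     ]
--     max_size = 99
--     return [
--         mms_ids[i * max_size : (i + 1) * max_size]
--         for i in range((len(mms_ids) + max_size - 1) // max_size)
--         if i != "Cannot find in Primo based on title."
--     ]
-- ===== SOURCE B (Python) =====
-- def prep_mms_ids_for_searching(etds):
--     result = []
--     current = []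
--     for etd in etds:
--         mms = etd["mms"]
--         if mms == "Cannot find in Primo based on title.":
--             continue
--         current.append(mms)
--         if len(current) == 99:
--             result.append(current)
--             current = []
--     if current:
--         result.append(current)
--     return result
-- ===== Notes on version B (the rewrite author's own statement) =====
-- stated objective: simpler
-- what changed: Replaces the two comprehensions (filter pass, then ceil-division with index slicing) by one fused pass that accumulates a current chunk and flushes it every 99 ids.
import Mathlib
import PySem

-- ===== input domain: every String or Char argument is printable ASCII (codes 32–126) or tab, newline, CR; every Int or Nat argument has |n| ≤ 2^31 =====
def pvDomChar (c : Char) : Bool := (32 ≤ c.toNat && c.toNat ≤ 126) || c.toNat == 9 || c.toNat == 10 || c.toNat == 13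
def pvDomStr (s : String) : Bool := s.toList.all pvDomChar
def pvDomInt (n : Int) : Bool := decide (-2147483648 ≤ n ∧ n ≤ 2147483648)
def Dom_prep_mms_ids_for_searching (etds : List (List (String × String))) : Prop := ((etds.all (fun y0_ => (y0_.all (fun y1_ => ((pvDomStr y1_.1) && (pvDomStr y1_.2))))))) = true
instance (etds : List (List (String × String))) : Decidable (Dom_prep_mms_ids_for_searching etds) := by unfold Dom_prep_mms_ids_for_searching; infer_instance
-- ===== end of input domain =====

-- B fuses A's filter comprehension and ceil-division/slicing comprehension into one
-- accumulating pass (objective: simpler); return values proved equal on Pre_.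

-- ===== PORT A =====
-- etd["mms"]: KeyError (= none) excluded by Pre_; getD "" is never reached inside Pre_.
def pvMms (etd : List (String × String)) : String :=
  ((PySem.Dict.mk etd).get? "mms").getD ""

def prep_mms_ids_for_searching (etds : List (List (String × String))) : List (List String) :=
  -- [etd["mms"] for etd in etds if etd["mms"] != "..."]
  let mms_ids : List String :=
    etds.foldl (fun acc etd =>
      if pvMms etd ≠ "Cannot find in Primo based on title." then acc ++ [pvMms etd] else acc) []
  let max_size : Int := 99
  -- [mms_ids[i*99:(i+1)*99] for i in range(ceil)]; the source's 'if i != "Cannot …"' compares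
  -- an int with a string and is always True in Python, so no filter appears here.
  (PySem.List.pyRange 0 (PySem.Int.floordiv ((mms_ids.length : Int) + max_size - 1) max_size) 1).foldl
    (fun acc i => acc ++ [PySem.List.slice mms_ids (some (i * max_size)) (some ((i + 1) * max_size))]) []

-- ===== PORT B =====
def pvAltGo : List (List (String × String)) → List String → List (List String) → List (List String)
  | [], current, result => if current ≠ [] then result ++ [current] else result
  | etd :: rest, current, result =>
    let mms := pvMms etd
    if mms = "Cannot find in Primo based on title." then
      pvAltGo rest current result
    else
      let current' := current ++ [mms]
      if current'.length = 99 then pvAltGo rest [] (result ++ [current'])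
      else pvAltGo rest current' result

def prep_mms_ids_for_searching_alt (etds : List (List (String × String))) : List (List String) :=
  pvAltGo etds [] []

-- ===== PRECONDITION & SPEC =====
-- Pre_ excludes exactly the inputs where some etd lacks the key "mms": there Python A
-- raises KeyError (and Python B raises too).
def Pre_prep_mms_ids_for_searching (etds : List (List (String × String))) : Prop :=
  etds.all (fun etd => (PySem.Dict.mk etd).contains "mms") = true

instance (etds : List (List (String × String))) : Decidable (Pre_prep_mms_ids_for_searching etds) := by
  unfold Pre_prep_mms_ids_for_searching; infer_instance

def pvWitness_prep_mms_ids_for_searching : (List (List (String × String))) :=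
  [[("mms", "99100")], [("mms", "Cannot find in Primo based on title.")]]

def Spec_prep_mms_ids_for_searching (etds : List (List (String × String))) (out : List (List String)) : Prop := out = prep_mms_ids_for_searching_alt etds
instance (etds : List (List (String × String))) (out : List (List String)) : Decidable (Spec_prep_mms_ids_for_searching etds out) := by unfold Spec_prep_mms_ids_for_searching; infer_instance

-- ===== CLAIM (what is proved, stated in full; the proofs are below) =====
def Claim_equal_prep_mms_ids_for_searching : Prop := ∀ (etds : List (List (String × String))), Dom_prep_mms_ids_for_searching etds → Pre_prep_mms_ids_for_searching etds → Spec_prep_mms_ids_for_searching etds (prep_mms_ids_for_searching etds)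

-- ===== LEMMAS AND PROOFS =====

-- Reference chunking: groups of 99, last group possibly short.
def pvChunks (xs : List String) : List (List String) :=
  if h : xs = [] then [] else xs.take 99 :: pvChunks (xs.drop 99)
termination_by xs.length
decreasing_by
  simp only [List.length_drop]
  have := List.length_pos_iff.mpr h
  omega

def pvFilt (etds : List (List (String × String))) : List String :=
  (etds.map pvMms).filter (fun m => m ≠ "Cannot find in Primo based on title.")

def pvBuildB : List String → List String → List (List String)
  | [], cur => if cur = [] then [] else [cur]
  | m :: ms, cur =>
    if (cur ++ [m]).length = 99 then (cur ++ [m]) :: pvBuildB ms [] else pvBuildB ms (cur ++ [m])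

lemma pvAltGo_eq (etds : List (List (String × String))) :
    ∀ cur res, pvAltGo etds cur res = res ++ pvBuildB (pvFilt etds) cur := by
  induction etds with
  | nil =>
    intro cur res
    by_cases h : cur = [] <;> simp [pvAltGo, pvFilt, pvBuildB, h]
  | cons etd rest ih =>
    intro cur res
    rw [pvAltGo]
    by_cases h : pvMms etd = "Cannot find in Primo based on title."
    · rw [if_pos h, ih]
      have : pvFilt (etd :: rest) = pvFilt rest := by simp [pvFilt, h]
      rw [this]
    · rw [if_neg h]
      have hf : pvFilt (etd :: rest) = pvMms etd :: pvFilt rest := by simp [pvFilt, h]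
      rw [hf, pvBuildB]
      by_cases h2 : (cur ++ [pvMms etd]).length = 99
      · rw [if_pos h2, if_pos h2, ih, List.append_assoc]; rfl
      · rw [if_neg h2, if_neg h2, ih]

-- The B-side accumulator builds pvChunks of cur ++ remaining input, as long as cur is short.
lemma pvBuild_chunks (ms : List String) :
    ∀ cur : List String, cur.length < 99 → pvBuildB ms cur = pvChunks (cur ++ ms) := by
  induction ms with
  | nil =>
    intro cur hc
    by_cases h : cur = []
    · simp [h, pvBuildB, pvChunks]
    · rw [pvBuildB, if_neg h, pvChunks]
      simp [h, List.take_of_length_le (by omega : cur.length ≤ 99),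
        List.drop_of_length_le (by omega : cur.length ≤ 99), pvChunks]
  | cons m ms ih =>
    intro cur hc
    rw [pvBuildB]
    by_cases h2 : (cur ++ [m]).length = 99
    · have hne : cur ++ m :: ms ≠ [] := by simp
      rw [if_pos h2, pvChunks]
      simp only [hne, dite_false]
      have hsplit : cur ++ m :: ms = (cur ++ [m]) ++ ms := by simp
      rw [ih [] (by simp), hsplit,
        List.take_append_of_le_length (by omega), List.drop_append_of_le_length (by omega)]
      simp [List.take_of_length_le (le_of_eq h2), List.drop_of_length_le (le_of_eq h2)]
    · have hlen : (cur ++ [m]).length < 99 := by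
        simp only [List.length_append, List.length_cons, List.length_nil] at h2 ⊢; omega
      rw [if_neg h2, ih _ hlen]
      simp

lemma pvSlice_chunks :
    ∀ (n : Nat) (xs : List String), n = (xs.length + 98) / 99 →
      (List.range n).map (fun k : Nat =>
        PySem.List.slice xs (some ((k : Int) * 99)) (some (((k : Int) + 1) * 99))) = pvChunks xs := by
  intro n
  induction n with
  | zero =>
    intro xs hn
    have : xs = [] := by
      have := hn.symm
      rcases xs with _ | ⟨a, t⟩
      · rfl
      · exfalso; simp only [List.length_cons] at this; omega
    simp [this, pvChunks]
  | succ n ih =>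
    intro xs hn
    have hxs : xs ≠ [] := by
      intro h; rw [h] at hn; simp at hn
    rw [List.range_succ_eq_map, List.map_cons, List.map_map, pvChunks]
    simp only [hxs, dite_false]
    congr 1
    · have : ((0 : Nat) : Int) * 99 = ((0 : Nat) : Int) := by norm_num
      rw [show (((0 : Nat) : Int) + 1) * 99 = ((99 : Nat) : Int) by norm_num,
        show ((0 : Nat) : Int) * 99 = ((0 : Nat) : Int) by norm_num]
      rw [PySem.List.slice_natCast]
      simp
    · rw [← ih (xs.drop 99) (by simp only [List.length_drop]; omega)]
      apply List.map_congr_left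
      intro k _
      simp only [Function.comp_apply]
      rw [show ((Nat.succ k : Nat) : Int) * 99 = (((k + 1) * 99 : Nat) : Int) by push_cast; ring,
        show (((Nat.succ k : Nat) : Int) + 1) * 99 = (((k + 1) * 99 + 99 : Nat) : Int) by push_cast; ring,
        show ((k : Nat) : Int) * 99 = (((k * 99 : Nat)) : Int) by push_cast; ring,
        show (((k : Nat) : Int) + 1) * 99 = (((k * 99 + 99 : Nat)) : Int) by push_cast; ring,
        PySem.List.slice_natCast, PySem.List.slice_natCast]
      rw [List.drop_drop]
      have h1 : (k + 1) * 99 + 99 - (k + 1) * 99 = k * 99 + 99 - k * 99 := by omega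
      have h2 : 99 + k * 99 = (k + 1) * 99 := by omega
      rw [h1, h2]

lemma pvFold_filt (etds : List (List (String × String))) :
    ∀ acc, etds.foldl (fun acc etd =>
      if pvMms etd ≠ "Cannot find in Primo based on title." then acc ++ [pvMms etd] else acc) acc
      = acc ++ pvFilt etds := by
  induction etds with
  | nil => intro acc; simp [pvFilt]
  | cons etd rest ih =>
    intro acc
    rw [List.foldl_cons]
    by_cases h : pvMms etd = "Cannot find in Primo based on title."
    · simp only [h, ne_eq, not_true_eq_false, if_false, ih]
      simp [pvFilt, h]
    · simp only [ne_eq, h, not_false_eq_true, if_true, ih]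
      simp [pvFilt, h]

lemma pvA_eq_chunks (etds : List (List (String × String))) :
    prep_mms_ids_for_searching etds = pvChunks (pvFilt etds) := by
  unfold prep_mms_ids_for_searching
  simp only [pvFold_filt, List.nil_append, PySem.List.foldl_append_singleton_eq_map]
  rw [show ((pvFilt etds).length : Int) + 99 - 1 = (((pvFilt etds).length + 98 : Nat) : Int) by push_cast; ring]
  rw [show (99 : Int) = ((99 : Nat) : Int) from rfl, PySem.Int.floordiv_natCast,
    PySem.List.pyRange_one, List.map_map]
  rw [show ((((((pvFilt etds).length + 98) / 99 : Nat) : Int)) - 0).toNat = ((pvFilt etds).length + 98) / 99 by omega]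
  rw [← pvSlice_chunks (((pvFilt etds).length + 98) / 99) (pvFilt etds) rfl]
  apply List.map_congr_left
  intro k _
  simp

-- ===== VERDICT (by name: the statement is the Claim_ definition above) =====
theorem prep_mms_ids_for_searching_spec : Claim_equal_prep_mms_ids_for_searching := by
  intro etds _ _
  unfold Spec_prep_mms_ids_for_searching prep_mms_ids_for_searching_alt
  rw [pvAltGo_eq, pvBuild_chunks _ _ (by simp), pvA_eq_chunks]
  simp
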